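-- pv_equiv track=rewrite | github.com/wagtx/zeric-googleads-localdata | mothersday/build_mothersday_import.py | project_row
-- ===== SOURCE A (Python) =====
-- def project_row(old_row: list[str], old_h: list[str], new_h: list[str]) -> list[str]:
--     oi = {n: i for i, n in enumerate(old_h)}
--     out = [""] * len(new_h)
--     for j, name in enumerate(new_h):
--         if name in oi:
--             k = oi[name]
--             if k < len(old_row):
--                 out[j] = old_row[k]
--     return out
-- ===== SOURCE B (Python) =====
-- def project_row(old_row: list[str], old_h: list[str], new_h: list[str]) -> list[str]:
--     # scatter: map each new-header name to all its positions in new_h, then walk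
--     # old_h backwards (last occurrence wins, later ones are skipped) writing each
--     # old value into all of that name's new slots
--     pos = {}
--     for j, name in enumerate(new_h):
--         pos.setdefault(name, []).append(j)
--     out = [""] * len(new_h)
--     n = len(old_row)
--     seen = set()
--     for k, name in reversed(list(enumerate(old_h))):
--         if name in seen:
--             continue
--         seen.add(name)
--         v = old_row[k] if k < n else ""
--         for j in pos.get(name, []):
--             out[j] = v
--     return out
-- ===== Notes on version B (the rewrite author's own statement) =====
-- stated objective: alternative
-- what changed: B scatters instead of gathering: it builds a dict from each new-header name to all its positions in new_h, then walks old_h in reverse (skipping names already seen, so the last occurrence wins) writing each old value, or '' past the row end, into all of that name's slots; A instead builds an old-header name-to-index dict and looks it up per new slot.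
import Mathlib
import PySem

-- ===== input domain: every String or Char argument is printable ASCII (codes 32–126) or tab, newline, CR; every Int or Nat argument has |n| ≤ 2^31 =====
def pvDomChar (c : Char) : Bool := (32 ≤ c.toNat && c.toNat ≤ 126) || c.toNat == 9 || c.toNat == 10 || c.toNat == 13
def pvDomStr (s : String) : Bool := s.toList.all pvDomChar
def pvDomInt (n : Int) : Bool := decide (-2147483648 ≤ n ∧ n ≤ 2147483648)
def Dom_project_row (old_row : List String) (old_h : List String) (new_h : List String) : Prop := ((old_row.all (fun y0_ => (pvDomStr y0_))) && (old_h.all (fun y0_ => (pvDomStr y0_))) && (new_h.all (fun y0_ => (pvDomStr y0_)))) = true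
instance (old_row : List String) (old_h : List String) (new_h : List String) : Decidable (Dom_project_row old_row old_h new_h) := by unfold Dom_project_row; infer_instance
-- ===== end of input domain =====

-- B scatters old values into their new slots via a positions dict built from new_h,
-- where A gathers per new slot via an index dict built from old_h (alternative decomposition).

-- ===== PORT A =====
def project_row (old_row : List String) (old_h : List String) (new_h : List String) : List String :=
  -- oi = {n: i for i, n in enumerate(old_h)}
  let oi : PySem.Dict String Int :=
    (PySem.List.enumerate old_h).foldl (fun d p => d.insert p.2 p.1) PySem.Dict.empty
  -- out = [""] * len(new_h); for j, name in enumerate(new_h): if name in oi: k = oi[name]; if k < len(old_row): out[j] = old_row[k]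
  (PySem.List.enumerate new_h).foldl (fun out p =>
    match oi.get? p.2 with
    | some k => if k < (old_row.length : Int) then PySem.List.pySetD out p.1 (PySem.List.pyGetD old_row k "") else out
    | none => out) (List.replicate new_h.length "")

-- ===== PORT B =====
def project_row_alt (old_row : List String) (old_h : List String) (new_h : List String) : List String :=
  -- pos.setdefault(name, []).append(j)  (ported as Dict.modify: pos[name] = pos.get(name, []) + [j])
  let pos : PySem.Dict String (List Int) :=
    (PySem.List.enumerate new_h).foldl (fun d p => d.modify p.2 ([] : List Int) (· ++ [p.1])) PySem.Dict.empty
  -- out = [""] * len(new_h); seen = set()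
  -- for k, name in reversed(list(enumerate(old_h))): if name in seen: continue; seen.add(name);
  --   v = old_row[k] if k < n else ""; for j in pos.get(name, []): out[j] = v
  let st := ((PySem.List.enumerate old_h).reverse).foldl (fun st p =>
      if PySem.Set.contains st.2 p.2 then st
      else
        let seen := PySem.Set.add st.2 p.2
        let v := if p.1 < (old_row.length : Int) then PySem.List.pyGetD old_row p.1 "" else ""
        ((pos.getD p.2 []).foldl (fun o j => PySem.List.pySetD o j v) st.1, seen))
    (List.replicate new_h.length "", PySem.Set.empty)
  st.1

-- ===== PRECONDITION & SPEC =====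
def Spec_project_row (old_row : List String) (old_h : List String) (new_h : List String) (out : List String) : Prop := out = project_row_alt old_row old_h new_h
instance (old_row : List String) (old_h : List String) (new_h : List String) (out : List String) : Decidable (Spec_project_row old_row old_h new_h out) := by unfold Spec_project_row; infer_instance

-- ===== CLAIM (what is proved, stated in full; the proofs are below) =====
def Claim_equal_project_row : Prop := ∀ (old_row : List String) (old_h : List String) (new_h : List String), Dom_project_row old_row old_h new_h → Spec_project_row old_row old_h new_h (project_row old_row old_h new_h)

-- ===== LEMMAS AND PROOFS =====

-- index of the LAST occurrence of name c in l (enumerated from s)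
def lastMatch (l : List String) (s : Int) (c : String) : Option Int :=
  (((PySem.List.enumerate l s).filter (fun p => p.2 == c)).map (·.1)).getLast?

-- the value both programs put into a slot named c
def projVal (old_row old_h : List String) (c : String) : String :=
  match lastMatch old_h 0 c with
  | some k => if k < (old_row.length : Int) then PySem.List.pyGetD old_row k "" else ""
  | none => ""

lemma enumerate_append_singleton {α : Type} (l : List α) (x : α) (s : Int) :
    PySem.List.enumerate (l ++ [x]) s = PySem.List.enumerate l s ++ [(s + l.length, x)] := by
  induction l generalizing s with
  | nil => simp [PySem.List.enumerate]
  | cons y l ih =>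
      simp [PySem.List.enumerate_cons, ih, List.cons_append]
      ring_nf

-- A's dict lookup is the last matching index in old_h
lemma oi_get (l : List String) (c : String) :
    ((PySem.List.enumerate l 0).foldl (fun d p => d.insert p.2 p.1) PySem.Dict.empty).get? c
      = lastMatch l 0 c := by
  induction l using List.reverseRecOn with
  | nil => simp [PySem.List.enumerate, lastMatch]
  | append_singleton l x ih =>
      rw [enumerate_append_singleton, List.foldl_append]
      simp only [List.foldl_cons, List.foldl_nil]
      rw [PySem.Dict.get?_insert]
      unfold lastMatch
      rw [enumerate_append_singleton, List.filter_append, List.map_append]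
      by_cases h : x = c
      · subst h; simp
      · simpa [h, Ne.symm h, lastMatch] using ih

-- A's gather loop, run over a suffix with an arbitrary already-built prefix
lemma gatherA (old_row : List String) (oi : PySem.Dict String Int) (l : List String) (pre : List String) :
    (PySem.List.enumerate l (pre.length : Int)).foldl (fun out p =>
        match oi.get? p.2 with
        | some k => if k < (old_row.length : Int) then PySem.List.pySetD out p.1 (PySem.List.pyGetD old_row k "") else out
        | none => out) (pre ++ List.replicate l.length "")
    = pre ++ l.map (fun c =>
        match oi.get? c with
        | some k => if k < (old_row.length : Int) then PySem.List.pyGetD old_row k "" else ""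
        | none => "") := by
  induction l generalizing pre with
  | nil => simp [PySem.List.enumerate]
  | cons x l ih =>
      rw [PySem.List.enumerate_cons]
      simp only [List.foldl_cons, List.length_cons, List.replicate_succ, List.map_cons]
      cases h : oi.get? x with
      | none =>
          have h1 : pre ++ "" :: List.replicate l.length "" = (pre ++ [""]) ++ List.replicate l.length "" := by simp
          have h2 : ((pre.length : Int) + 1) = (((pre ++ [""]).length : Int)) := by simp
          rw [h1, h2, ih (pre ++ [""])]
          simp
      | some k =>
          by_cases hk : k < (old_row.length : Int)
          · simp only [if_pos hk]
            have hset : PySem.List.pySetD (pre ++ "" :: List.replicate l.length "") (pre.length : Int) (PySem.List.pyGetD old_row k "")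
                = (pre ++ [PySem.List.pyGetD old_row k ""]) ++ List.replicate l.length "" := by
              rw [PySem.List.pySetD_natCast]
              rw [List.set_append]
              simp
            have h2 : ((pre.length : Int) + 1) = (((pre ++ [PySem.List.pyGetD old_row k ""]).length : Int)) := by simp
            rw [hset, h2, ih]
            simp
          · simp only [if_neg hk]
            have h1 : pre ++ "" :: List.replicate l.length "" = (pre ++ [""]) ++ List.replicate l.length "" := by simp
            have h2 : ((pre.length : Int) + 1) = (((pre ++ [""]).length : Int)) := by simp
            rw [h1, h2, ih (pre ++ [""])]
            simp

-- B's positions dict: getD returns every slot of name c, in order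
lemma pos_getD (new_h : List String) (c : String) :
    (((PySem.List.enumerate new_h).foldl (fun d p => d.modify p.2 ([] : List Int) (· ++ [p.1])) PySem.Dict.empty).getD c [])
      = ((PySem.List.enumerate new_h).filter (fun p => p.2 == c)).map (·.1) := by
  have hswap : (PySem.List.enumerate new_h).foldl (fun d p => d.modify p.2 ([] : List Int) (· ++ [p.1])) PySem.Dict.empty
      = ((PySem.List.enumerate new_h).map Prod.swap).foldl (fun d p => d.modify p.1 ([] : List Int) (· ++ [p.2])) PySem.Dict.empty := by
    rw [List.foldl_map]; rfl
  rw [hswap, PySem.Dict.getD_foldl_modify_append]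
  rw [List.filter_map, List.map_map]
  have hf : ((fun p => p.1 == c) ∘ (Prod.swap : Int × String → String × Int)) = (fun p => p.2 == c) := by
    funext p; rfl
  rw [hf]
  simp only [PySem.Dict.getD_empty, List.nil_append]
  apply List.map_congr_left
  intro p hp
  simp [Prod.swap]

lemma mem_enumerate_iff {α : Type} (l : List α) (s : Int) (p : Int × α) :
    p ∈ PySem.List.enumerate l s ↔ ∃ k : Nat, k < l.length ∧ p.1 = s + k ∧ l[k]? = some p.2 := by
  induction l generalizing s with
  | nil => simp [PySem.List.enumerate]
  | cons y l ih =>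
      simp only [PySem.List.enumerate_cons, List.mem_cons, ih]
      constructor
      · rintro (rfl | ⟨k, hk, h1, h2⟩)
        · exact ⟨0, by simp⟩
        · exact ⟨k + 1, by simpa using hk, by push_cast at h1 ⊢; omega, by simpa using h2⟩
      · rintro ⟨k, hk, h1, h2⟩
        cases k with
        | zero => left; simp at h2 h1; cases p; simp_all
        | succ k =>
            right; exact ⟨k, by simpa using hk, by push_cast at h1 ⊢; omega, by simpa using h2⟩

lemma mem_posList_iff (new_h : List String) (c : String) (i : Int) :
    i ∈ ((PySem.List.enumerate new_h).filter (fun p => p.2 == c)).map (·.1)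
      ↔ ∃ j : Nat, j < new_h.length ∧ i = (j : Int) ∧ new_h[j]? = some c := by
  simp only [List.mem_map, List.mem_filter, mem_enumerate_iff]
  constructor
  · rintro ⟨p, ⟨⟨k, hk, h1, h2⟩, hc⟩, rfl⟩
    exact ⟨k, hk, by omega, by simp_all⟩
  · rintro ⟨j, hj, rfl, hc⟩
    exact ⟨((j : Int), c), ⟨⟨j, hj, by omega, hc⟩, by simp⟩, rfl⟩

lemma length_foldl_pySetD (js : List Int) (v : String) (out : List String) :
    (js.foldl (fun o i => PySem.List.pySetD o i v) out).length = out.length := by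
  induction js generalizing out with
  | nil => rfl
  | cons i js ih => simp [ih, PySem.List.length_pySetD]

-- writing v at every (in-range) index of js, read back at j
lemma getElem?_foldl_pySetD (js : List Int) (v : String) (out : List String) (j : Nat)
    (h0 : ∀ i ∈ js, 0 ≤ i ∧ i < (out.length : Int)) :
    (js.foldl (fun o i => PySem.List.pySetD o i v) out)[j]? = if (j : Int) ∈ js then some v else out[j]? := by
  induction js generalizing out with
  | nil => simp
  | cons i js ih =>
      obtain ⟨hi0, hilen⟩ := h0 i (by simp)
      have hset : PySem.List.pySetD out i v = out.set i.toNat v := PySem.List.pySetD_of_nonneg out v hi0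
      simp only [List.foldl_cons, hset]
      rw [ih _ (by intro a ha; have := h0 a (by simp [ha]); simpa [List.length_set] using this)]
      by_cases hm : (j : Int) ∈ js
      · simp [hm]
      · by_cases hij : (j : Int) = i
        · have hji : i.toNat = j := by omega
          have hjl : j < out.length := by omega
          simp [hij, hji, hjl]
        · have hji : ¬ (i.toNat = j) := by omega
          simp [hm, hij, hji]

lemma length_scatter (old_row : List String) (pos : PySem.Dict String (List Int)) (ps : List (Int × String))
    (out : List String) (seen : PySem.Set String) :
    ((ps.foldl (fun st p =>
      if PySem.Set.contains st.2 p.2 then st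
      else
        let seen := PySem.Set.add st.2 p.2
        let v := if p.1 < (old_row.length : Int) then PySem.List.pyGetD old_row p.1 "" else ""
        ((pos.getD p.2 []).foldl (fun o j => PySem.List.pySetD o j v) st.1, seen)) (out, seen)).1).length = out.length := by
  induction ps generalizing out seen with
  | nil => rfl
  | cons p ps ih =>
      simp only [List.foldl_cons]
      by_cases h : PySem.Set.contains seen p.2
      · simp only [h, if_true]; exact ih out seen
      · simp only [h]
        rw [ih]
        exact length_foldl_pySetD _ _ _

-- B's scatter loop, read back at slot j (named c): the first processed pair wins
lemma scatterB (old_row new_h : List String) (ps : List (Int × String)) (out : List String) (seen : PySem.Set String)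
    (hlen : out.length = new_h.length) (j : Nat) (c : String) (hc : new_h[j]? = some c) :
    ((ps.foldl (fun st p =>
      if PySem.Set.contains st.2 p.2 then st
      else
        let seen := PySem.Set.add st.2 p.2
        let v := if p.1 < (old_row.length : Int) then PySem.List.pyGetD old_row p.1 "" else ""
        ((((PySem.List.enumerate new_h).foldl (fun d p => d.modify p.2 ([] : List Int) (· ++ [p.1])) PySem.Dict.empty).getD p.2 []).foldl
          (fun o j => PySem.List.pySetD o j v) st.1, seen)) (out, seen)).1)[j]?
    = if c ∈ seen then out[j]?
      else match ps.find? (fun p => p.2 == c) with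
        | some q => some (if q.1 < (old_row.length : Int) then PySem.List.pyGetD old_row q.1 "" else "")
        | none => out[j]? := by
  induction ps generalizing out seen with
  | nil => simp only [List.foldl_nil, List.find?_nil]; split <;> rfl
  | cons p ps ih =>
      simp only [List.foldl_cons]
      by_cases hs : p.2 ∈ seen
      · have hst : PySem.Set.contains seen p.2 = true := by
          simp only [PySem.Set.contains_eq_listContains, List.contains_iff_mem]; exact hs
        simp only [hst, reduceIte]
        rw [ih out seen hlen]
        by_cases hcs : c ∈ seen
        · simp [hcs]
        · have hpc : ¬ (p.2 == c) := by
            intro hb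
            exact hcs ((by simpa using hb : p.2 = c) ▸ hs)
          simp [hcs, hpc]
      · have hst : PySem.Set.contains seen p.2 = false := by
          simp only [PySem.Set.contains_eq_listContains, List.contains_eq_mem, decide_eq_false_iff_not]
          exact hs
        simp only [hst, Bool.false_eq_true, if_false]
        have hout' : ∀ out1 : List String, out1.length = new_h.length →
            ∀ v : String,
            ((((PySem.List.enumerate new_h).foldl (fun d p => d.modify p.2 ([] : List Int) (· ++ [p.1])) PySem.Dict.empty).getD p.2 []).foldl
              (fun o j => PySem.List.pySetD o j v) out1)[j]?
              = if new_h[j]? = some p.2 then some v else out1[j]? := by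
          intro out1 hlen1 v
          rw [pos_getD, getElem?_foldl_pySetD]
          · by_cases hx : new_h[j]? = some p.2
            · have hmem : (j : Int) ∈ ((PySem.List.enumerate new_h).filter (fun q => q.2 == p.2)).map (·.1) := by
                rw [mem_posList_iff]
                exact ⟨j, (List.getElem?_eq_some_iff.mp hx).1, rfl, hx⟩
              simp [hmem, hx]
            · have hmem : ¬ ((j : Int) ∈ ((PySem.List.enumerate new_h).filter (fun q => q.2 == p.2)).map (·.1)) := by
                rw [mem_posList_iff]
                rintro ⟨j', hj', hjj, hc'⟩
                have : j' = j := by omega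
                subst this; exact hx hc'
              simp [hmem, hx]
          · intro i hi
            rw [mem_posList_iff] at hi
            obtain ⟨j', hj', rfl, _⟩ := hi
            refine ⟨by omega, ?_⟩
            rw [hlen1]; exact_mod_cast hj'
        rw [ih _ _ (by rw [length_foldl_pySetD]; exact hlen)]
        rw [hout' out hlen]
        by_cases hcp : p.2 = c
        · subst hcp
          have hseen' : p.2 ∈ PySem.Set.add seen p.2 := by
            rw [PySem.Set.mem_add]; right; rfl
          simp [hseen', hc]
          exact fun h => absurd h hs
        · have hcs' : c ∈ PySem.Set.add seen p.2 ↔ c ∈ seen := by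
            rw [PySem.Set.mem_add]
            constructor
            · rintro (h | h)
              · exact h
              · exact absurd h.symm hcp
            · exact Or.inl
          have hx : ¬ (new_h[j]? = some p.2) := by
            rw [hc]; intro h
            injection h with h'
            exact hcp h'.symm
          have hpc : ¬ (p.2 == c) := by
            intro hb; exact hcp (by simpa using hb)
          by_cases hcs : c ∈ seen
          · simp [hcs, hcs', hx]
          · simp [hcs, hcs', hx, hpc]

lemma projectA_eq_map (old_row old_h new_h : List String) :
    project_row old_row old_h new_h = new_h.map (projVal old_row old_h) := by
  unfold project_row
  have h := gatherA old_row
      ((PySem.List.enumerate old_h).foldl (fun d p => d.insert p.2 p.1) PySem.Dict.empty)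
      new_h ([] : List String)
  simp only [List.length_nil, Nat.cast_zero, List.nil_append] at h
  rw [h]
  apply List.map_congr_left
  intro c _
  rw [oi_get, projVal]

lemma lastMatch_eq_find_reverse (l : List String) (c : String) :
    lastMatch l 0 c = ((PySem.List.enumerate l 0).reverse.find? (fun p => p.2 == c)).map (·.1) := by
  simp [lastMatch]

lemma projectB_eq_map (old_row old_h new_h : List String) :
    project_row_alt old_row old_h new_h = new_h.map (projVal old_row old_h) := by
  unfold project_row_alt
  apply List.ext_getElem?
  intro j
  by_cases hj : j < new_h.length
  · have hc : new_h[j]? = some (new_h[j]'hj) := List.getElem?_eq_getElem hj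
    rw [scatterB old_row new_h ((PySem.List.enumerate old_h).reverse) (List.replicate new_h.length "")
        PySem.Set.empty (by simp) j (new_h[j]'hj) hc]
    rw [List.getElem?_map, hc]
    have hemp : ¬ ((new_h[j]'hj) ∈ (PySem.Set.empty : PySem.Set String)) := by
      simp [PySem.Set.empty]
    rw [if_neg hemp]
    have hlm := lastMatch_eq_find_reverse old_h (new_h[j]'hj)
    cases h : (PySem.List.enumerate old_h).reverse.find? (fun p => p.2 == (new_h[j]'hj)) with
    | none =>
        have : lastMatch old_h 0 (new_h[j]'hj) = none := by rw [hlm, h]; rfl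
        simp [projVal, this, hj]
    | some q =>
        have : lastMatch old_h 0 (new_h[j]'hj) = some q.1 := by rw [hlm, h]; rfl
        simp [projVal, this]
  · have h1 : new_h.length ≤ j := by omega
    rw [List.getElem?_eq_none (by rw [length_scatter]; simpa using h1)]
    rw [List.getElem?_eq_none (by simpa using h1)]

-- ===== VERDICT (by name: the statement is the Claim_ definition above) =====
theorem project_row_spec : Claim_equal_project_row := by
  intro old_row old_h new_h _
  unfold Spec_project_row
  rw [projectA_eq_map, projectB_eq_map]
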